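-- pv_equiv track=rewrite | github.com/Danielfoojunwei/trustlens | trustlens/compliance/breach.py | _windows_for
-- ===== SOURCE A (Python) =====
-- def _windows_for(jurisdictions: list[str]) -> list[str]:
--     """Map jurisdiction tags to applicable reporting-window IDs."""
--     out: set[str] = set()
--     for j in jurisdictions:
--         j = j.lower()
--         if j in {"eu", "gdpr"}:
--             out.update({"gdpr_dpa", "gdpr_subjects"})
--         if j == "ccpa":
--             out.add("ccpa")
--         if j in {"dora", "eu_finance"}:
--             out.update({"dora_initial", "dora_interim", "dora_final"})
--         if j in {"eu_ai_act", "eu_ai"}: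
--             out.add("eu_ai_act")
--         if j == "hipaa":
--             out.add("hipaa")
--         if j in {"india_dpdp", "india"}:
--             out.add("india_dpdp")
--         if j in {"korea_ai", "korea"}:
--             out.add("korea_ai")
--         if j in {"sec_cyber", "sec"}:
--             out.add("sec_cyber")
--     return sorted(out)
-- ===== SOURCE B (Python) =====
-- # Output-driven rewrite: instead of accumulating windows per tag and sorting,
-- # build the lowered tag set once and filter a fixed, already-sorted candidate
-- # list of window IDs by whether any of its aliases appears among the tags.
-- _WINDOW_ALIASES = [  # window IDs in ascending (sorted) order
--     ("ccpa", ("ccpa",)),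
--     ("dora_final", ("dora", "eu_finance")),
--     ("dora_initial", ("dora", "eu_finance")),
--     ("dora_interim", ("dora", "eu_finance")),
--     ("eu_ai_act", ("eu_ai_act", "eu_ai")),
--     ("gdpr_dpa", ("eu", "gdpr")),
--     ("gdpr_subjects", ("eu", "gdpr")),
--     ("hipaa", ("hipaa",)),
--     ("india_dpdp", ("india_dpdp", "india")),
--     ("korea_ai", ("korea_ai", "korea")),
--     ("sec_cyber", ("sec_cyber", "sec")),
-- ]
--
-- def _windows_for(jurisdictions: list[str]) -> list[str]:
--     tags = {j.lower() for j in jurisdictions}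
--     return [w for w, aliases in _WINDOW_ALIASES if any(a in tags for a in aliases)]
-- ===== Notes on version B (the rewrite author's own statement) =====
-- stated objective: alternative
-- what changed: Inverted the direction of the computation: instead of accumulating window IDs into a set per input tag and sorting at the end, B builds the set of lowered tags once and filters a fixed, already-sorted candidate list of window IDs by whether any of its aliases occurs among the tags, so no output set and no sort are needed.
import Mathlib
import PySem

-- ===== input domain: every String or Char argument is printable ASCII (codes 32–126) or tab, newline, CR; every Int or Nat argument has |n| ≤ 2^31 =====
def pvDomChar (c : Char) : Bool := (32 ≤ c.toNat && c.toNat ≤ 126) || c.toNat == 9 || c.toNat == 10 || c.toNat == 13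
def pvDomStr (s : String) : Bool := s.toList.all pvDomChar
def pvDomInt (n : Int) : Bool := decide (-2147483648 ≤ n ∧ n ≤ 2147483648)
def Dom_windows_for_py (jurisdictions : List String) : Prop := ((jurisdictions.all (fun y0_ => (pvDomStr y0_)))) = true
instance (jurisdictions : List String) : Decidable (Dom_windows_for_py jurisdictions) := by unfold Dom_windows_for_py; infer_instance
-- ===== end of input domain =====

-- B inverts A: instead of accumulating window IDs per tag and sorting at the end, it builds
-- the lowered tag set once and filters a fixed, already-sorted candidate list of window IDs.

-- ===== PORT A =====
-- loop body of A: j = j.lower(); eight independent membership tests updating the set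
def windowsForBodyA (out : PySem.Set String) (j : String) : PySem.Set String :=
  let j2 := PySem.Str.lower j
  let out := if (PySem.Set.ofList ["eu", "gdpr"]).contains j2 then
      PySem.Set.update out ["gdpr_dpa", "gdpr_subjects"] else out
  let out := if j2 == "ccpa" then PySem.Set.add out "ccpa" else out
  let out := if (PySem.Set.ofList ["dora", "eu_finance"]).contains j2 then
      PySem.Set.update out ["dora_initial", "dora_interim", "dora_final"] else out
  let out := if (PySem.Set.ofList ["eu_ai_act", "eu_ai"]).contains j2 then
      PySem.Set.add out "eu_ai_act" else out
  let out := if j2 == "hipaa" then PySem.Set.add out "hipaa" else out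
  let out := if (PySem.Set.ofList ["india_dpdp", "india"]).contains j2 then
      PySem.Set.add out "india_dpdp" else out
  let out := if (PySem.Set.ofList ["korea_ai", "korea"]).contains j2 then
      PySem.Set.add out "korea_ai" else out
  let out := if (PySem.Set.ofList ["sec_cyber", "sec"]).contains j2 then
      PySem.Set.add out "sec_cyber" else out
  out

def windows_for_py (jurisdictions : List String) : List String :=
  PySem.List.sorted (jurisdictions.foldl windowsForBodyA PySem.Set.empty) (fun x => x) false

-- ===== PORT B =====
-- window IDs in ascending (sorted) order, each with the aliases that trigger it
def windowAliases : List (String × List String) :=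
  [("ccpa", ["ccpa"]),
   ("dora_final", ["dora", "eu_finance"]),
   ("dora_initial", ["dora", "eu_finance"]),
   ("dora_interim", ["dora", "eu_finance"]),
   ("eu_ai_act", ["eu_ai_act", "eu_ai"]),
   ("gdpr_dpa", ["eu", "gdpr"]),
   ("gdpr_subjects", ["eu", "gdpr"]),
   ("hipaa", ["hipaa"]),
   ("india_dpdp", ["india_dpdp", "india"]),
   ("korea_ai", ["korea_ai", "korea"]),
   ("sec_cyber", ["sec_cyber", "sec"])]

def windows_for_py_alt (jurisdictions : List String) : List String :=
  let tags : PySem.Set String := PySem.Set.ofList (jurisdictions.map PySem.Str.lower)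
  (windowAliases.filter (fun p => p.2.any (fun a => PySem.Set.contains tags a))).map (fun p => p.1)

-- ===== PRECONDITION & SPEC =====
def Spec_windows_for_py (jurisdictions : List String) (out : List String) : Prop := out = windows_for_py_alt jurisdictions
instance (jurisdictions : List String) (out : List String) : Decidable (Spec_windows_for_py jurisdictions out) := by unfold Spec_windows_for_py; infer_instance

-- ===== CLAIM (what is proved, stated in full; the proofs are below) =====
def Claim_equal_windows_for_py : Prop := ∀ (jurisdictions : List String), Dom_windows_for_py jurisdictions → Spec_windows_for_py jurisdictions (windows_for_py jurisdictions)

-- ===== LEMMAS AND PROOFS =====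
-- the alias→windows table A's branches implement, as a lookup (proof-side only)
def fwdTable : PySem.Dict String (List String) :=
  PySem.Dict.mk
  [("eu", ["gdpr_dpa", "gdpr_subjects"]),
   ("gdpr", ["gdpr_dpa", "gdpr_subjects"]),
   ("ccpa", ["ccpa"]),
   ("dora", ["dora_initial", "dora_interim", "dora_final"]),
   ("eu_finance", ["dora_initial", "dora_interim", "dora_final"]),
   ("eu_ai_act", ["eu_ai_act"]),
   ("eu_ai", ["eu_ai_act"]),
   ("hipaa", ["hipaa"]),
   ("india_dpdp", ["india_dpdp"]),
   ("india", ["india_dpdp"]),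
   ("korea_ai", ["korea_ai"]),
   ("korea", ["korea_ai"]),
   ("sec_cyber", ["sec_cyber"]),
   ("sec", ["sec_cyber"])]

-- A's eight branches on a single lowered tag collapse to one table update
theorem body_core (out : PySem.Set String) (s : String) :
    (let out := if (PySem.Set.ofList ["eu", "gdpr"]).contains s then
        PySem.Set.update out ["gdpr_dpa", "gdpr_subjects"] else out
     let out := if s == "ccpa" then PySem.Set.add out "ccpa" else out
     let out := if (PySem.Set.ofList ["dora", "eu_finance"]).contains s then
        PySem.Set.update out ["dora_initial", "dora_interim", "dora_final"] else out
     let out := if (PySem.Set.ofList ["eu_ai_act", "eu_ai"]).contains s then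
        PySem.Set.add out "eu_ai_act" else out
     let out := if s == "hipaa" then PySem.Set.add out "hipaa" else out
     let out := if (PySem.Set.ofList ["india_dpdp", "india"]).contains s then
        PySem.Set.add out "india_dpdp" else out
     let out := if (PySem.Set.ofList ["korea_ai", "korea"]).contains s then
        PySem.Set.add out "korea_ai" else out
     let out := if (PySem.Set.ofList ["sec_cyber", "sec"]).contains s then
        PySem.Set.add out "sec_cyber" else out
     out)
      = PySem.Set.update out (PySem.Dict.getD fwdTable s []) := by
  by_cases h : s ∈ (["eu", "gdpr", "ccpa", "dora", "eu_finance", "eu_ai_act", "eu_ai",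
      "hipaa", "india_dpdp", "india", "korea_ai", "korea", "sec_cyber", "sec"] : List String)
  · simp only [List.mem_cons, List.not_mem_nil, or_false] at h
    rcases h with h | h | h | h | h | h | h | h | h | h | h | h | h | h <;> subst h <;> rfl
  · simp only [List.mem_cons, List.not_mem_nil, or_false, not_or] at h
    obtain ⟨h1, h2, h3, h4, h5, h6, h7, h8, h9, h10, h11, h12, h13, h14⟩ := h
    simp [PySem.Set.ofList, PySem.Set.add, PySem.Set.contains, fwdTable,
      PySem.Dict.getD, PySem.Dict.get?, PySem.Set.update,
      h1, h2, h3, h4, h5, h6, h7, h8, h9, h10, h11, h12, h13, h14,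
      Ne.symm h1, Ne.symm h2, Ne.symm h3, Ne.symm h4, Ne.symm h5, Ne.symm h6, Ne.symm h7,
      Ne.symm h8, Ne.symm h9, Ne.symm h10, Ne.symm h11, Ne.symm h12, Ne.symm h13, Ne.symm h14]

theorem body_eq (out : PySem.Set String) (j : String) :
    windowsForBodyA out j
      = PySem.Set.update out (PySem.Dict.getD fwdTable (PySem.Str.lower j) []) :=
  body_core out (PySem.Str.lower j)

-- membership across A's whole fold
theorem mem_foldA (js : List String) (out : PySem.Set String) (w : String) :
    w ∈ js.foldl windowsForBodyA out
      ↔ w ∈ out ∨ ∃ j ∈ js, w ∈ PySem.Dict.getD fwdTable (PySem.Str.lower j) [] := by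
  induction js generalizing out with
  | nil => simp
  | cons j t ih =>
    simp only [List.foldl_cons, body_eq, ih, PySem.Set.mem_update, List.mem_cons]
    constructor
    · rintro ((h | h) | ⟨x, hx, hw⟩)
      · exact Or.inl h
      · exact Or.inr ⟨j, Or.inl rfl, h⟩
      · exact Or.inr ⟨x, Or.inr hx, hw⟩
    · rintro (h | ⟨x, (rfl | hx), hw⟩)
      · exact Or.inl (Or.inl h)
      · exact Or.inl (Or.inr hw)
      · exact Or.inr ⟨x, hx, hw⟩

-- A's per-tag contribution read against B's alias table
theorem contrib_iff (s w : String) :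
    w ∈ PySem.Dict.getD fwdTable s [] ↔ ∃ p ∈ windowAliases, p.1 = w ∧ s ∈ p.2 := by
  by_cases h : s ∈ (["eu", "gdpr", "ccpa", "dora", "eu_finance", "eu_ai_act", "eu_ai",
      "hipaa", "india_dpdp", "india", "korea_ai", "korea", "sec_cyber", "sec"] : List String)
  · simp only [List.mem_cons, List.not_mem_nil, or_false] at h
    rcases h with h | h | h | h | h | h | h | h | h | h | h | h | h | h <;> subst h <;>
      simp [fwdTable, windowAliases, PySem.Dict.getD, PySem.Dict.get?, eq_comm] <;> tauto
  · simp only [List.mem_cons, List.not_mem_nil, or_false, not_or] at h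
    obtain ⟨h1, h2, h3, h4, h5, h6, h7, h8, h9, h10, h11, h12, h13, h14⟩ := h
    simp [fwdTable, windowAliases, PySem.Dict.getD, PySem.Dict.get?,
      h1, h2, h3, h4, h5, h6, h7, h8, h9, h10, h11, h12, h13, h14,
      Ne.symm h1, Ne.symm h2, Ne.symm h3, Ne.symm h4, Ne.symm h5, Ne.symm h6, Ne.symm h7,
      Ne.symm h8, Ne.symm h9, Ne.symm h10, Ne.symm h11, Ne.symm h12, Ne.symm h13, Ne.symm h14]

theorem foldA_nodup (js : List String) (out : PySem.Set String) (h : out.Nodup) :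
    (js.foldl windowsForBodyA out).Nodup := by
  induction js generalizing out with
  | nil => exact h
  | cons j t ih =>
    simp only [List.foldl_cons, body_eq]
    exact ih _ (PySem.Set.nodup_update _ _ h)

-- B's candidate list of window IDs is strictly increasing
theorem windowIds_pairwise : (windowAliases.map (fun p => p.1)).Pairwise (· < ·) := by
  have h : windowAliases.Pairwise (fun p q => p.1.toList < q.1.toList) := by decide
  have h2 : (windowAliases.map (fun p => p.1)).Pairwise (fun a b : String => a.toList < b.toList) :=
    List.pairwise_map.mpr h
  exact h2.imp (fun hab => String.lt_iff_toList_lt.mpr hab)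

theorem windows_for_py_spec : Claim_equal_windows_for_py := by
  intro js _
  unfold Spec_windows_for_py windows_for_py windows_for_py_alt
  have hsub : ((windowAliases.filter
        (fun p => p.2.any (fun a =>
          PySem.Set.contains (PySem.Set.ofList (js.map PySem.Str.lower)) a))).map
        (fun p => p.1)).Sublist (windowAliases.map (fun p => p.1)) :=
    List.Sublist.map _ List.filter_sublist
  apply PySem.List.sorted_eq_of_perm_of_pairwise_lt
  · rw [List.perm_ext_iff_of_nodup (hsub.nodup windowIds_pairwise.nodup)
      (foldA_nodup js PySem.Set.empty (by decide))]
    intro w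
    simp only [List.mem_map, List.mem_filter, mem_foldA, PySem.Set.empty,
      List.not_mem_nil, false_or, contrib_iff, List.any_eq_true,
      PySem.Set.contains_iff, PySem.Set.mem_ofList, List.mem_map]
    constructor
    · rintro ⟨p, ⟨hp, a, ha, j, hj, hja⟩, rfl⟩
      exact ⟨j, hj, p, hp, rfl, hja ▸ ha⟩
    · rintro ⟨j, hj, p, hp, rfl, ha⟩
      exact ⟨p, ⟨hp, _, ha, j, hj, rfl⟩, rfl⟩
  · exact windowIds_pairwise.sublist hsub
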